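-- pv_equiv track=rewrite | github.com/Tikout/Python2 | PracaZ.Plikami/Slowa.py | word_ending_stats
-- ===== SOURCE A (Python) =====
-- import string
--
-- def word_ending_stats(text):
--     text = text.translate(str.maketrans("", "", string.punctuation))
--     words = text.split()
--     ending_stats = {}
--
--     for word in words:
--         if word:
--             last_letter = word[-1].lower()
--             if last_letter in ending_stats:
--                 ending_stats[last_letter] += 1
--             else:
--                 ending_stats[last_letter] = 1
--     return ending_stats
-- ===== SOURCE B (Python) =====
-- import string
--
-- def word_ending_stats(text):
--     # Single streaming pass over the characters: skip punctuation, remember the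
--     # last kept character of the current word, and tally its lowercase form at
--     # each whitespace boundary (and once at the end).  No translate, no split,
--     # no intermediate word list.
--     punct = set(string.punctuation)
--     stats = {}
--     last = None
--     for ch in text:
--         if ch in punct:
--             continue
--         if ch.isspace():
--             if last is not None:
--                 k = last.lower()
--                 stats[k] = stats.get(k, 0) + 1
--                 last = None
--         else:
--             last = ch
--     if last is not None:
--         k = last.lower()
--         stats[k] = stats.get(k, 0) + 1
--     return stats
-- ===== Notes on version B (the rewrite author's own statement) =====
-- stated objective: alternative
-- what changed: A builds a cleaned copy via translate, splits it into a word list and tallies each word's last letter into a dict with a membership branch; B is a single streaming state machine over the raw characters that skips punctuation, remembers only the last kept character of the current word, and tallies its lowercase form at each whitespace boundary, so no cleaned string, no split and no word list exist.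
import Mathlib
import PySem

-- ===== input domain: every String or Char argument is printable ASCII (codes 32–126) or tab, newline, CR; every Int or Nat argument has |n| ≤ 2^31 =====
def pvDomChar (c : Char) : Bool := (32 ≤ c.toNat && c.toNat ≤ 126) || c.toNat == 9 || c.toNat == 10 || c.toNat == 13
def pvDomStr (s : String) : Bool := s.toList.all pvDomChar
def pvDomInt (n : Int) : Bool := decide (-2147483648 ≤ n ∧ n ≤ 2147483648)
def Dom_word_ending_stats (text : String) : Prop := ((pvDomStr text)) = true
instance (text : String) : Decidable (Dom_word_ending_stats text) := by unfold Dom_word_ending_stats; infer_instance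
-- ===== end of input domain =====

-- B replaces A's translate-then-split-then-tally pipeline by one streaming state
-- machine over the characters (skip punctuation, remember the last kept char of
-- the current word, tally its lowercase form at each whitespace boundary).

-- ===== PORT A =====
-- string.punctuation
def pvPunct : List Char := "!\"#$%&'()*+,-./:;<=>?@[\\]^_`{|}~".toList

-- text.translate(str.maketrans("", "", string.punctuation)): deletes exactly the
-- punctuation characters, i.e. a filter (exact; this is the whole effect of that call).
def pvClean (text : String) : List Char := text.toList.filter (fun c => !pvPunct.contains c)

-- word[-1].lower() in A: PySem.List.pyGet? w (-1) is `some` on every word split()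
-- yields (they are nonempty), so the [] arm is unreachable.
def pvLastLower (w : List Char) : String :=
  String.ofList (PySem.Chars.lower ((PySem.List.pyGet? w (-1)).elim [] (fun c => [c])))

def word_ending_stats (text : String) : List (String × Int) :=
  let words := PySem.Chars.split₀ (pvClean text)
  (words.foldl (fun d w =>
      if w ≠ [] then
        let last_letter := pvLastLower w
        if d.contains last_letter then
          d.insert last_letter (d.getD last_letter 0 + 1)
        else
          d.insert last_letter 1
      else d)
    PySem.Dict.empty).items

-- ===== PORT B =====
-- ch.lower() for one character (same as A's one-char .lower())
def pvLowC (c : Char) : String := String.ofList (PySem.Chars.lower [c])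

-- stats[k] = stats.get(k, 0) + 1
def pvTally (d : PySem.Dict String Int) (k : String) : PySem.Dict String Int :=
  d.insert k (d.getD k 0 + 1)

-- one step of B's loop: state = (stats, last = last kept char of current word)
def pvStep (s : PySem.Dict String Int × Option Char) (ch : Char) :
    PySem.Dict String Int × Option Char :=
  if pvPunct.contains ch then s
  else if PySem.Chars.isspace ch then
    match s.2 with
    | some c => (pvTally s.1 (pvLowC c), none)
    | none => s
  else (s.1, some ch)

def word_ending_stats_alt (text : String) : List (String × Int) :=
  let r := text.toList.foldl pvStep (PySem.Dict.empty, none)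
  (match r.2 with
   | some c => pvTally r.1 (pvLowC c)
   | none => r.1).items

-- ===== PRECONDITION & SPEC =====
def Spec_word_ending_stats (text : String) (out : List (String × Int)) : Prop := out = word_ending_stats_alt text
instance (text : String) (out : List (String × Int)) : Decidable (Spec_word_ending_stats text out) := by unfold Spec_word_ending_stats; infer_instance

-- ===== CLAIM (what is proved, stated in full; the proofs are below) =====
def Claim_equal_word_ending_stats : Prop := ∀ (text : String), Dom_word_ending_stats text → Spec_word_ending_stats text (word_ending_stats text)

-- ===== LEMMAS AND PROOFS =====

-- B's step on a non-punctuation character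
def pvStep' (s : PySem.Dict String Int × Option Char) (ch : Char) :
    PySem.Dict String Int × Option Char :=
  if PySem.Chars.isspace ch then
    match s.2 with
    | some c => (pvTally s.1 (pvLowC c), none)
    | none => s
  else (s.1, some ch)

-- final flush of B's state
def pvFlush (s : PySem.Dict String Int × Option Char) : PySem.Dict String Int :=
  match s.2 with
  | some c => pvTally s.1 (pvLowC c)
  | none => s.1

-- skipping punctuation inline = filtering first
theorem pv_fold_filter (l : List Char) (s : PySem.Dict String Int × Option Char) :
    l.foldl pvStep s = (l.filter (fun c => !pvPunct.contains c)).foldl pvStep' s := by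
  rw [List.foldl_filter]
  have : pvStep = fun s c => if !pvPunct.contains c then pvStep' s c else s := by
    funext s c
    by_cases h : pvPunct.contains c = true
    · rw [if_neg (by simpa using h)]
      show (if pvPunct.contains c = true then s else pvStep' s c) = s
      rw [if_pos h]
    · rw [if_pos (by simpa using h)]
      show (if pvPunct.contains c = true then s else pvStep' s c) = pvStep' s c
      rw [if_neg h]
  rw [this]

-- A's contains/insert branch is exactly the get(k,0)+1 counting step
theorem pv_branch_eq (d : PySem.Dict String Int) (k : String) :
    (if d.contains k then d.insert k (d.getD k 0 + 1) else d.insert k 1)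
      = d.insert k (d.getD k 0 + 1) := by
  by_cases h : d.contains k = true
  · simp [h]
  · simp [h, PySem.Dict.getD_of_not_contains d 0 (by simpa using h)]

-- split₀.go's accumulator is just prepended output
theorem pv_go_acc (s cur : List Char) (acc : List (List Char)) :
    PySem.Chars.split₀.go s cur acc = acc.reverse ++ PySem.Chars.split₀.go s cur [] := by
  induction s generalizing cur acc with
  | nil =>
    simp only [PySem.Chars.split₀.go]
    split <;> simp
  | cons c rest ih =>
    simp only [PySem.Chars.split₀.go]
    split
    · split
      · exact ih [] acc
      · rw [ih, ih [] [cur.reverse]]; simp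
    · exact ih _ _

-- the lowercase last letter of a word, read from its reversed spelling
theorem pv_lastLower_rev (x : Char) (xs : List Char) :
    pvLastLower (xs.reverse ++ [x]) = pvLowC x := by
  simp [pvLastLower, pvLowC, PySem.List.pyGet?_neg_one_append_singleton]

-- MAIN INVARIANT: B's machine (over punctuation-free chars), flushed at the end,
-- equals A's counting fold over the last letters of the words split₀ produces,
-- where the machine's `last` component is the head of split₀'s reversed current word.
theorem pv_machine_eq (s : List Char) (d : PySem.Dict String Int) (cur : List Char) :
    pvFlush (s.foldl pvStep' (d, cur.head?))
      = ((PySem.Chars.split₀.go s cur []).map pvLastLower).foldl pvTally d := by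
  induction s generalizing d cur with
  | nil =>
    cases cur with
    | nil => simp [PySem.Chars.split₀.go, pvFlush]
    | cons x xs =>
      rw [show PySem.Chars.split₀.go [] (x :: xs) [] = [(x :: xs).reverse] from rfl]
      simp [pvFlush, pv_lastLower_rev]
  | cons c rest ih =>
    simp only [List.foldl_cons, PySem.Chars.split₀.go]
    by_cases hs : PySem.Chars.isspace c = true
    · cases cur with
      | nil =>
        simpa [pvStep', hs] using ih d []
      | cons x xs =>
        rw [if_pos hs]
        simp only [List.isEmpty_cons, if_neg (by decide : (false : Bool) ≠ true)]
        rw [pv_go_acc rest [] [(x :: xs).reverse]]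
        simp only [pvStep', hs, if_pos, List.head?_cons, List.reverse_cons,
          List.reverse_nil, List.nil_append, List.map_append, List.map_cons,
          List.map_nil, List.foldl_append, List.foldl_cons, List.foldl_nil,
          pv_lastLower_rev]
        exact ih (pvTally d (pvLowC x)) []
    · rw [if_neg hs]
      have : pvStep' (d, cur.head?) c = (d, (c :: cur).head?) := by
        simp [pvStep', hs]
      rw [this]
      exact ih d (c :: cur)

-- A's fold over nonempty words is the counting fold over the endings list
theorem pv_go_ne_nil (s cur : List Char) (acc : List (List Char))
    (hacc : ∀ w ∈ acc, w ≠ []) : ∀ w ∈ PySem.Chars.split₀.go s cur acc, w ≠ [] := by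
  induction s generalizing cur acc with
  | nil =>
    intro w hw
    simp only [PySem.Chars.split₀.go] at hw
    split at hw
    · exact hacc w (by simpa using hw)
    · simp only [List.mem_reverse, List.mem_cons] at hw
      rcases hw with h | h
      · subst h; simp_all [List.isEmpty_iff]
      · exact hacc w h
  | cons c rest ih =>
    intro w hw
    simp only [PySem.Chars.split₀.go] at hw
    split at hw
    · split at hw
      · exact ih _ _ hacc w hw
      · refine ih _ _ ?_ w hw
        intro v hv
        rcases List.mem_cons.mp hv with h | h
        · subst h; simp_all [List.isEmpty_iff]
        · exact hacc v h
    · exact ih _ _ hacc w hw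

theorem pv_split₀_ne_nil (s : List Char) : ∀ w ∈ PySem.Chars.split₀ s, w ≠ [] :=
  pv_go_ne_nil s [] [] (by simp)

theorem pv_foldl_eq (ws : List (List Char)) (h : ∀ w ∈ ws, w ≠ [])
    (d : PySem.Dict String Int) :
    ws.foldl (fun d w =>
        if w ≠ [] then
          if d.contains (pvLastLower w) then
            d.insert (pvLastLower w) (d.getD (pvLastLower w) 0 + 1)
          else
            d.insert (pvLastLower w) 1
        else d) d
      = (ws.map pvLastLower).foldl pvTally d := by
  induction ws generalizing d with
  | nil => rfl
  | cons w ws ih =>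
    have hw : w ≠ [] := h w (by simp)
    rw [List.foldl_cons, List.map_cons, List.foldl_cons, if_pos hw, pv_branch_eq]
    exact ih (fun v hv => h v (by simp [hv])) _

-- ===== VERDICT (by name: the statement is the Claim_ definition above) =====
theorem word_ending_stats_spec : Claim_equal_word_ending_stats := by
  intro text _
  simp only [Spec_word_ending_stats, word_ending_stats, word_ending_stats_alt]
  rw [pv_foldl_eq _ (pv_split₀_ne_nil _) _, pv_fold_filter]
  have h := pv_machine_eq (pvClean text) PySem.Dict.empty []
  simp only [List.head?_nil] at h
  have hs : PySem.Chars.split₀ (pvClean text)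
      = PySem.Chars.split₀.go (pvClean text) [] [] := rfl
  rw [hs, ← h]
  rfl
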